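-- pv_equiv track=rewrite | github.com/chethankumar-ai/prepinsta-top-100-codes | numbers/decimal_hexa.py | dec_hexa
-- ===== SOURCE A (Python) =====
-- def dec_hexa(num):
--     hexa = []
--     while num !=0:
--         x=num%16
--         if x<10:
--             hexa.append(chr(x+48))
--         else:
--             hexa.append(chr(x+55))
--         num//=16
--     hexa.reverse()
--     return''.join(hexa)
-- ===== SOURCE B (Python) =====
-- def dec_hexa(num):
--     if num == 0:
--         return ''
--     q, r = divmod(num, 16)
--     return dec_hexa(q) + chr(r + 48 if r < 10 else r + 55)
-- ===== Notes on version B (the rewrite author's own statement) =====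
-- stated objective: simpler
-- what changed: Replaced the append-digits-then-reverse while loop with a direct recursion on the quotient that builds the string most-significant digit first, so no list, no reverse and no join are needed.
import Mathlib
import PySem

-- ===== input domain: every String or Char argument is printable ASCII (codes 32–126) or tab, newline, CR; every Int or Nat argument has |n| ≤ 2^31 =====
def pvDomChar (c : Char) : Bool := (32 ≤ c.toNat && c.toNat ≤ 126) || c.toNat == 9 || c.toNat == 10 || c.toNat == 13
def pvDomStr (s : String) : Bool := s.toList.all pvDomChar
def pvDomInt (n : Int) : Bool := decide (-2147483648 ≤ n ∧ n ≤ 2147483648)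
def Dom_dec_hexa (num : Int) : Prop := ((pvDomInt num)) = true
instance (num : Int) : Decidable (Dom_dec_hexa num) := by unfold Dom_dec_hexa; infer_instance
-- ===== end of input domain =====

-- B replaces A's append-digits-then-reverse while loop by direct recursion on the quotient (simpler decomposition, same cost).


-- ===== PORT A =====
-- A's while loop, with fuel only to make the same computation total (num.toNat + 1 iterations always suffice for num ≥ 0)
def decHexaLoop : Nat → Int → List Char → List Char
  | 0, _, hexa => hexa
  | fuel + 1, num, hexa =>
    if num ≠ 0 then
      let x := PySem.Int.mod num 16
      let hexa := hexa ++ [if x < 10 then Char.ofNat (x + 48).toNat else Char.ofNat (x + 55).toNat]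
      decHexaLoop fuel (PySem.Int.floordiv num 16) hexa
    else hexa

def dec_hexa (num : Int) : String :=
  String.ofList (decHexaLoop (num.toNat + 1) num []).reverse

-- ===== PORT B =====
-- B's recursion, with the same kind of fuel guard for totality
def decHexaRec : Nat → Int → String
  | 0, _ => ""
  | fuel + 1, num =>
    if num = 0 then ""
    else
      let q := PySem.Int.floordiv num 16
      let r := PySem.Int.mod num 16
      decHexaRec fuel q ++ String.ofList [if r < 10 then Char.ofNat (r + 48).toNat else Char.ofNat (r + 55).toNat]

def dec_hexa_alt (num : Int) : String :=
  decHexaRec (num.toNat + 1) num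

-- ===== PRECONDITION & SPEC =====
-- A never returns on negative input (its while loop runs forever there), so Pre_ admits exactly the nonnegative inputs.
def Pre_dec_hexa (num : Int) : Prop := 0 ≤ num
instance (num : Int) : Decidable (Pre_dec_hexa num) := by unfold Pre_dec_hexa; infer_instance

def pvWitness_dec_hexa : Int := (255)

def Spec_dec_hexa (num : Int) (out : String) : Prop := out = dec_hexa_alt num
instance (num : Int) (out : String) : Decidable (Spec_dec_hexa num out) := by unfold Spec_dec_hexa; infer_instance

-- ===== CLAIM (what is proved, stated in full; the proofs are below) =====
def Claim_equal_dec_hexa : Prop := ∀ (num : Int), Dom_dec_hexa num → Pre_dec_hexa num → Spec_dec_hexa num (dec_hexa num)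

-- ===== LEMMAS AND PROOFS =====

-- canonical hex digit list of a natural number, most significant first
def hexDig (x : Int) : Char :=
  if x < 10 then Char.ofNat (x + 48).toNat else Char.ofNat (x + 55).toNat

def hexNat (n : Nat) : List Char :=
  if n = 0 then [] else hexNat (n / 16) ++ [hexDig ((n % 16 : Nat) : Int)]
termination_by n
decreasing_by exact Nat.div_lt_self (Nat.pos_of_ne_zero (by assumption)) (by norm_num)

theorem floordiv_nat (n : Nat) : PySem.Int.floordiv (n : Int) 16 = ((n / 16 : Nat) : Int) := by
  exact_mod_cast PySem.Int.floordiv_natCast n 16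

theorem mod_nat (n : Nat) : PySem.Int.mod (n : Int) 16 = ((n % 16 : Nat) : Int) := by
  exact_mod_cast PySem.Int.mod_natCast n 16

theorem loopA_eq (fuel : Nat) : ∀ (n : Nat) (acc : List Char), n < 16 ^ fuel →
    decHexaLoop fuel (n : Int) acc = acc ++ (hexNat n).reverse := by
  induction fuel with
  | zero =>
    intro n acc h
    interval_cases n
    simp [decHexaLoop, hexNat]
  | succ f ih =>
    intro n acc h
    by_cases h0 : n = 0
    · subst h0; simp [decHexaLoop, hexNat]
    · have hn : ((n : Int) ≠ 0) := by exact_mod_cast h0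
      have hdiv : n / 16 < 16 ^ f := by
        apply Nat.div_lt_of_lt_mul
        calc n < 16 ^ (f + 1) := h
          _ = 16 * 16 ^ f := by ring
      simp only [decHexaLoop, if_pos hn, floordiv_nat, mod_nat]
      rw [ih (n / 16) _ hdiv]
      conv_rhs => rw [hexNat]
      simp only [if_neg h0, hexDig, List.reverse_append, List.reverse_singleton]
      simp

theorem recB_eq (fuel : Nat) : ∀ (n : Nat), n < 16 ^ fuel →
    decHexaRec fuel (n : Int) = String.ofList (hexNat n) := by
  induction fuel with
  | zero =>
    intro n h
    interval_cases n
    simp [decHexaRec, hexNat]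
  | succ f ih =>
    intro n h
    by_cases h0 : n = 0
    · subst h0; simp [decHexaRec, hexNat]
    · have hn : ¬((n : Int) = 0) := by exact_mod_cast h0
      have hdiv : n / 16 < 16 ^ f := by
        apply Nat.div_lt_of_lt_mul
        calc n < 16 ^ (f + 1) := h
          _ = 16 * 16 ^ f := by ring
      simp only [decHexaRec, if_neg hn, floordiv_nat, mod_nat]
      rw [ih (n / 16) hdiv]
      conv_rhs => rw [hexNat]
      simp only [if_neg h0, hexDig]
      exact String.ofList_append.symm

theorem lt_pow_fuel (n : Nat) : n < 16 ^ (n + 1) := by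
  calc n < 2 ^ n := Nat.lt_two_pow_self
    _ ≤ 16 ^ n := Nat.pow_le_pow_left (by norm_num) n
    _ < 16 ^ (n + 1) := Nat.pow_lt_pow_succ (by norm_num)

-- ===== VERDICT (by name: the statement is the Claim_ definition above) =====
theorem dec_hexa_spec : Claim_equal_dec_hexa := by
  intro num _ hpre
  have hcast : ((num.toNat : Int)) = num := Int.toNat_of_nonneg hpre
  unfold Spec_dec_hexa dec_hexa dec_hexa_alt
  rw [← hcast]
  simp only [Int.toNat_natCast]
  rw [loopA_eq _ _ _ (lt_pow_fuel num.toNat), recB_eq _ _ (lt_pow_fuel num.toNat)]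
  simp
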